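-- pv_equiv track=rewrite | github.com/arifqasemi/interview-pre | coderbyte/mean-mode/index.py | meanMode
-- ===== SOURCE A (Python) =====
-- def meanMode(strArr):
--     average = sum(strArr) // len(strArr)
--     repeated_num = 0
--     single_num = []
--     for i in strArr:
--         if i in single_num and i == average:
--             return True
--         else:
--             single_num.append(i)
--     return False
-- ===== SOURCE B (Python) =====
-- def meanMode(strArr):
--     average = sum(strArr) // len(strArr)
--     counts = {}
--     for i in strArr:
--         counts[i] = counts.get(i, 0) + 1
--     return counts.get(average, 0) >= 2
-- ===== Notes on version B (the rewrite author's own statement) =====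
-- stated objective: faster
-- what changed: B builds a full frequency table in one pass and then checks counts.get(average,0) >= 2, replacing A's early-exit scan that tests membership in an ever-growing seen-list (quadratic membership tests).
import Mathlib
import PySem

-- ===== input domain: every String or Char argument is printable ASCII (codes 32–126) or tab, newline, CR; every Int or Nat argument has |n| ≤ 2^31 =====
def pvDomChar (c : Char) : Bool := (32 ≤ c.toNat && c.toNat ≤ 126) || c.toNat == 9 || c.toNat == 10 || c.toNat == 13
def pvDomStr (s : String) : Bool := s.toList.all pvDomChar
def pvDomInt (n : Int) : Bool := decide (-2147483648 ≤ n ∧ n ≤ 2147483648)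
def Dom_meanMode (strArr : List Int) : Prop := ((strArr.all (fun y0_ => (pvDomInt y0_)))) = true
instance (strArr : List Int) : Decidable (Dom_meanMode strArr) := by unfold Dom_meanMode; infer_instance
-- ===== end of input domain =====

-- B replaces A's early-exit scan over a growing seen-list by a one-pass frequency table plus a final lookup (idiomatic).

-- ===== PORT A =====
-- the for-loop of A: state is the growing single_num list; early return True
def meanModeLoop (average : Int) (single_num : List Int) : List Int → Bool
  | [] => false
  | i :: rest =>
    if single_num.contains i && (i == average) then true
    else meanModeLoop average (single_num ++ [i]) rest

def meanMode (strArr : List Int) : Bool :=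
  let average := PySem.Int.floordiv (strArr.foldl (· + ·) 0) strArr.length
  meanModeLoop average [] strArr

-- ===== PORT B =====
def meanMode_alt (strArr : List Int) : Bool :=
  let average := PySem.Int.floordiv (strArr.foldl (· + ·) 0) strArr.length
  let counts := strArr.foldl (fun d i => d.modify i 0 (· + 1)) PySem.Dict.empty
  decide ((2 : Int) ≤ counts.getD average 0)

-- ===== PRECONDITION & SPEC =====
-- Pre_ excludes only the empty list, on which both A and B raise ZeroDivisionError.
def Pre_meanMode (strArr : List Int) : Prop := strArr ≠ []
instance (strArr : List Int) : Decidable (Pre_meanMode strArr) := by unfold Pre_meanMode; infer_instance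
def pvWitness_meanMode : List Int := ([1, 2, 3, 2])

def Spec_meanMode (strArr : List Int) (out : Bool) : Prop := out = meanMode_alt strArr
instance (strArr : List Int) (out : Bool) : Decidable (Spec_meanMode strArr out) := by unfold Spec_meanMode; infer_instance

-- ===== CLAIM (what is proved, stated in full; the proofs are below) =====
def Claim_equal_meanMode : Prop := ∀ (strArr : List Int), Dom_meanMode strArr → Pre_meanMode strArr → Spec_meanMode strArr (meanMode strArr)

-- ===== LEMMAS AND PROOFS =====

-- invariant of A's loop: with at most one copy of `average` already seen, the loop
-- answers whether `average` occurs at least twice in seen ++ rest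
lemma meanModeLoop_eq (average : Int) :
    ∀ (rest single_num : List Int), single_num.count average ≤ 1 →
      meanModeLoop average single_num rest
        = decide (2 ≤ single_num.count average + rest.count average) := by
  intro rest
  induction rest with
  | nil =>
      intro s hs
      simp [meanModeLoop]
      omega
  | cons i rest ih =>
      intro s hs
      by_cases hc : s.contains i && (i == average)
      · simp only [meanModeLoop, hc, if_true]
        obtain ⟨hmem, heq⟩ := Bool.and_eq_true_iff.mp hc
        have hi : i = average := by simpa using heq
        have h1 : 1 ≤ s.count average := by
          subst hi; exact List.one_le_count_iff.mpr (by simpa using hmem)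
        have : (i :: rest).count average = rest.count average + 1 := by
          simp [hi, List.count_cons]
        rw [this]
        simp only [decide_eq_true_eq] at *
        symm; simp; omega
      · simp only [meanModeLoop, hc, Bool.false_eq_true, if_false]
        have hcount : (s ++ [i]).count average ≤ 1 := by
          by_cases hi : i = average
          · have hmem : ¬ s.contains i := by
              intro h
              apply hc
              simp only [hi] at h ⊢
              simpa using h
            have : s.count average = 0 := by
              subst hi
              simpa using List.count_eq_zero_of_not_mem (by simpa using hmem)
            simp [List.count_append, this, hi]
          · simpa [List.count_append, hi] using hs
        rw [ih (s ++ [i]) hcount]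
        congr 1
        simp [List.count_append, List.count_cons]
        by_cases hi : i = average <;> simp [hi] <;> omega

-- ===== VERDICT (by name: the statement is the Claim_ definition above) =====
theorem meanMode_spec : Claim_equal_meanMode := by
  intro strArr _ _
  simp only [Spec_meanMode, meanMode, meanMode_alt, meanModeLoop_eq _ strArr [] (by simp),
    PySem.Dict.getD_foldl_modify_add_one, PySem.Dict.getD_empty]
  simp
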